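-- pv_equiv track=rewrite | github.com/pratikbhatia199/bundler | bundler.py | expand_tokens_after_street
-- ===== SOURCE A (Python) =====
-- def expand_tokens_after_street(line2):
--     # Level 2 C
--     tokens = line2.split()
--     last_index = 0
--     for index, token in enumerate(tokens):
--         if token == 'STREET' or token == 'AVENUE':
--             last_index = index
--             apt_token = tokens[last_index+1:]
--             if len(apt_token) == 1:
--                 if '#' in apt_token[0]:
--                     tokens.pop()
--                     tokens.append(apt_token[0].replace('#', 'APARTMENT '))
--
--     return ' '.join(tokens)
-- ===== SOURCE B (Python) =====
-- def expand_tokens_after_street(line2):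
--     # Direct positional check: A only ever rewrites when a STREET/AVENUE token
--     # sits second-to-last; no scan over the tokens is needed.
--     tokens = line2.split()
--     if len(tokens) >= 2 and tokens[-2] in ('STREET', 'AVENUE') and '#' in tokens[-1]:
--         tokens[-1] = tokens[-1].replace('#', 'APARTMENT ')
--     return ' '.join(tokens)
-- ===== Notes on version B (the rewrite author's own statement) =====
-- stated objective: simpler
-- what changed: Replaces A's scan over all tokens (with slicing and pop/append inside the loop) by one direct positional check on the last two tokens, since a rewrite can only ever fire when STREET/AVENUE is second-to-last.
import Mathlib
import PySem

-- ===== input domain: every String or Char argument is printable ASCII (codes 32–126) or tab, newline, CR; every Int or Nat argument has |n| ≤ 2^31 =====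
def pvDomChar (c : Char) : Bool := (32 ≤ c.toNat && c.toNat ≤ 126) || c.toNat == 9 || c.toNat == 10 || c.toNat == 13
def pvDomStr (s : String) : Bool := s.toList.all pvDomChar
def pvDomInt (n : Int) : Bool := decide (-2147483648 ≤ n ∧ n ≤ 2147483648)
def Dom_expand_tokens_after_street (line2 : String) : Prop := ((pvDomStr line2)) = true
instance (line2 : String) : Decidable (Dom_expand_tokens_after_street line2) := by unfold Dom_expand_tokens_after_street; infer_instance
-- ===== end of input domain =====

-- B replaces A's whole-list scan by a direct check on the last two tokens (simpler; same results).

-- ===== PORT A =====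
-- one iteration of A's for-loop: state is (tokens, last_index); the list keeps
-- constant length (pop then append), so Python's enumerate over the live list
-- is exactly index 0..n-1 reading the current tokens[index].
def pvStepA (st : List String × Int) (index : Int) : List String × Int :=
  let tokens := st.1
  let token := PySem.List.pyGetD tokens index ""
  if token = "STREET" ∨ token = "AVENUE" then
    let last_index := index
    let apt_token := PySem.List.slice tokens (some (last_index + 1)) none
    if apt_token.length = 1 then
      if PySem.Str.isIn "#" (PySem.List.pyGetD apt_token 0 "") then
        match PySem.List.pop? tokens (-1) with
        | some (_, rest) =>
            (rest ++ [PySem.Str.replace (PySem.List.pyGetD apt_token 0 "") "#" "APARTMENT "], last_index)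
        | none => (tokens, last_index)
      else (tokens, last_index)
    else (tokens, last_index)
  else st

def expand_tokens_after_street (line2 : String) : String :=
  let tokens := PySem.Str.split₀ line2
  let res := (PySem.List.pyRange 0 (tokens.length : Int) 1).foldl pvStepA (tokens, 0)
  PySem.Str.join " " res.1

-- ===== PORT B =====
def expand_tokens_after_street_alt (line2 : String) : String :=
  let tokens := PySem.Str.split₀ line2
  let tokens' :=
    if 2 ≤ tokens.length ∧
       (PySem.List.pyGetD tokens (-2) "" = "STREET" ∨ PySem.List.pyGetD tokens (-2) "" = "AVENUE") ∧
       PySem.Str.isIn "#" (PySem.List.pyGetD tokens (-1) "") = true then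
      tokens.dropLast ++ [PySem.Str.replace (PySem.List.pyGetD tokens (-1) "") "#" "APARTMENT "]
    else tokens
  PySem.Str.join " " tokens'

-- ===== PRECONDITION & SPEC =====
def Spec_expand_tokens_after_street (line2 : String) (out : String) : Prop := out = expand_tokens_after_street_alt line2
instance (line2 : String) (out : String) : Decidable (Spec_expand_tokens_after_street line2 out) := by unfold Spec_expand_tokens_after_street; infer_instance

-- ===== CLAIM (what is proved, stated in full; the proofs are below) =====
def Claim_equal_expand_tokens_after_street : Prop := ∀ (line2 : String), Dom_expand_tokens_after_street line2 → Spec_expand_tokens_after_street line2 (expand_tokens_after_street line2)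

-- ===== LEMMAS AND PROOFS =====

-- the tokens component of one step (independent of last_index)
def pvTok (t : List String) (i : Int) : List String := (pvStepA (t, 0) i).1

theorem pvStepA_fst (t : List String) (x i : Int) : (pvStepA (t, x) i).1 = pvTok t i := by
  unfold pvTok pvStepA
  dsimp only
  split_ifs <;> rfl

theorem foldl_pvStepA_fst (l : List Int) (t : List String) (x : Int) :
    (l.foldl pvStepA (t, x)).1 = l.foldl pvTok t := by
  induction l generalizing t x with
  | nil => rfl
  | cons i l ih =>
      simp only [List.foldl_cons]
      rw [show pvStepA (t, x) i = ((pvStepA (t, x) i).1, (pvStepA (t, x) i).2) from rfl,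
          pvStepA_fst, ih]

theorem pvTok_id (t : List String) (i : Int) (h0 : 0 ≤ i) (h2 : i + 2 ≠ (t.length : Int)) :
    pvTok t i = t := by
  unfold pvTok pvStepA
  dsimp only
  split_ifs with hc hl <;> try rfl
  exfalso
  rw [PySem.List.slice_from t (show (0:Int) ≤ i + 1 by omega)] at hl
  simp only [List.length_drop] at hl
  omega

theorem foldl_pvTok_id (l : List Int) (t : List String) (h : ∀ i ∈ l, pvTok t i = t) :
    l.foldl pvTok t = t := by
  induction l with
  | nil => rfl
  | cons i l ih =>
      simp only [List.foldl_cons, h i (by simp)]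
      exact ih (fun j hj => h j (by simp [hj]))

theorem pvTok_main (t : List String) (h2 : 2 ≤ t.length) :
    pvTok t ((t.length : Int) - 2) =
      if (PySem.List.pyGetD t (-2) "" = "STREET" ∨ PySem.List.pyGetD t (-2) "" = "AVENUE") ∧
         PySem.Str.isIn "#" (PySem.List.pyGetD t (-1) "") = true then
        t.dropLast ++ [PySem.Str.replace (PySem.List.pyGetD t (-1) "") "#" "APARTMENT "]
      else t := by
  have hne : t ≠ [] := by intro h; subst h; simp at h2
  have hg2 : PySem.List.pyGetD t ((t.length : Int) - 2) "" = PySem.List.pyGetD t (-2) "" := by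
    rw [PySem.List.pyGetD_neg_ofNat t 2 "" (by omega) (by omega)]
    rw [show ((t.length : Int) - 2) = ((t.length - 2 : Nat) : Int) by omega]
    rw [PySem.List.pyGetD_natCast]
    exact List.getD_eq_getElem t "" (by omega)
  have hslice : PySem.List.slice t (some ((t.length : Int) - 2 + 1)) none = [t.getLast hne] := by
    rw [PySem.List.slice_from t (show (0:Int) ≤ (t.length : Int) - 2 + 1 by omega)]
    rw [show ((t.length : Int) - 2 + 1).toNat = t.length - 1 by omega]
    exact List.drop_length_sub_one hne
  have hg1 : PySem.List.pyGetD t (-1) "" = t.getLast hne := PySem.List.pyGetD_neg_one t "" hne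
  have hpop : PySem.List.pop? t (-1) = some (t.getLast hne, t.dropLast) := by
    conv_lhs => rw [← List.dropLast_append_getLast hne]
    exact PySem.List.pop?_last _ _
  unfold pvTok pvStepA
  dsimp only
  rw [hg2, hslice, hg1, hpop]
  simp only [List.length_cons, List.length_nil, PySem.List.pyGetD_zero_cons]
  split_ifs <;> simp_all

theorem expand_tokens_after_street_spec' (t : List String) :
    ((PySem.List.pyRange 0 (t.length : Int) 1).foldl pvStepA (t, 0)).1 =
      (if 2 ≤ t.length ∧
          (PySem.List.pyGetD t (-2) "" = "STREET" ∨ PySem.List.pyGetD t (-2) "" = "AVENUE") ∧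
          PySem.Str.isIn "#" (PySem.List.pyGetD t (-1) "") = true then
        t.dropLast ++ [PySem.Str.replace (PySem.List.pyGetD t (-1) "") "#" "APARTMENT "]
      else t) := by
  rw [foldl_pvStepA_fst]
  by_cases h2 : 2 ≤ t.length
  · have hsplit : PySem.List.pyRange 0 (t.length : Int) 1 =
        PySem.List.pyRange 0 ((t.length : Int) - 2) 1 ++ [(t.length : Int) - 2, (t.length : Int) - 1] := by
      rw [PySem.List.pyRange_one_append 0 ((t.length : Int) - 2) (t.length : Int) (by omega) (by omega)]
      congr 1
      rw [PySem.List.pyRange_one_cons (by omega)]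
      rw [show (t.length : Int) - 2 + 1 = (t.length : Int) - 1 by ring]
      rw [PySem.List.pyRange_one_cons (by omega)]
      rw [PySem.List.pyRange_one_eq_nil (by omega)]
    rw [hsplit, List.foldl_append]
    have hpre : List.foldl pvTok t (PySem.List.pyRange 0 ((t.length : Int) - 2) 1) = t :=
      foldl_pvTok_id _ _ (by
        intro i hi
        rw [PySem.List.mem_pyRange_one] at hi
        exact pvTok_id t i hi.1 (by omega))
    rw [hpre]
    simp only [List.foldl_cons, List.foldl_nil]
    rw [pvTok_main t h2]
    by_cases hc : (PySem.List.pyGetD t (-2) "" = "STREET" ∨ PySem.List.pyGetD t (-2) "" = "AVENUE") ∧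
        PySem.Str.isIn "#" (PySem.List.pyGetD t (-1) "") = true
    · rw [if_pos hc, if_pos ⟨h2, hc⟩]
      refine pvTok_id _ _ (by omega) ?_
      have hlen : (t.dropLast ++ [PySem.Str.replace (PySem.List.pyGetD t (-1) "") "#" "APARTMENT "]).length = t.length := by
        simp [List.length_dropLast]
        omega
      rw [hlen]
      omega
    · rw [if_neg hc, if_neg (by tauto)]
      exact pvTok_id _ _ (by omega) (by omega)
  · rw [if_neg (by tauto)]
    exact foldl_pvTok_id _ _ (by
      intro i hi
      rw [PySem.List.mem_pyRange_one] at hi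
      exact pvTok_id t i hi.1 (by omega))

-- ===== VERDICT (by name: the statement is the Claim_ definition above) =====
theorem expand_tokens_after_street_spec : Claim_equal_expand_tokens_after_street := by
  intro line2 _
  unfold Spec_expand_tokens_after_street expand_tokens_after_street expand_tokens_after_street_alt
  dsimp only
  rw [expand_tokens_after_street_spec']
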